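-- pv_equiv track=rewrite | github.com/jay-thakur/geeksforgeeks_py | practice/Basic/num_with_prime_freq_greater_than_or_equal_to_k.py | num_with_prime_freq_greater_than_or_equal_to_k
-- ===== SOURCE A (Python) =====
-- import math
--
-- def prime(n):
--     if n == 1:
--         return False
--     for i in range(2, int(math.sqrt(n)) + 1):
--         if n % i == 0:
--             return False
--     return True
--
-- def num_with_prime_freq_greater_than_or_equal_to_k(times, data):
--     c = []
--     data.sort()
--
--     for i in data:
--         if prime(data.count(i)):
--             if data.count(i) >= times:
--                 if i not in c:
--                     c.append(i)
--     if len(c) != 0: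
--         return c
--     else:
--         return [-1]
-- ===== SOURCE B (Python) =====
-- import math
--
-- def num_with_prime_freq_greater_than_or_equal_to_k(times, data):
--     data.sort()
--     freq = {}
--     for x in data:
--         freq[x] = freq.get(x, 0) + 1
--     maxf = len(data)  # every frequency is at most len(data)
--     # sieve: is_prime[f] says whether f is prime, for 0 <= f <= maxf
--     is_prime = [i >= 2 for i in range(maxf + 1)]
--     for p in range(2, math.isqrt(maxf) + 1):
--         for m in range(p * p, maxf + 1, p):
--             is_prime[m] = False
--     res = [x for x, f in freq.items() if is_prime[f] and f >= times]
--     return res if res else [-1]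
-- ===== Notes on version B (the rewrite author's own statement) =====
-- stated objective: faster
-- what changed: B builds a frequency dict in one pass and precomputes a Sieve-of-Eratosthenes-style primality table up to len(data), then filters the dict's keys once, instead of A's per-element data.count scan plus trial-division prime test plus membership-in-result scan.
import Mathlib
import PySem

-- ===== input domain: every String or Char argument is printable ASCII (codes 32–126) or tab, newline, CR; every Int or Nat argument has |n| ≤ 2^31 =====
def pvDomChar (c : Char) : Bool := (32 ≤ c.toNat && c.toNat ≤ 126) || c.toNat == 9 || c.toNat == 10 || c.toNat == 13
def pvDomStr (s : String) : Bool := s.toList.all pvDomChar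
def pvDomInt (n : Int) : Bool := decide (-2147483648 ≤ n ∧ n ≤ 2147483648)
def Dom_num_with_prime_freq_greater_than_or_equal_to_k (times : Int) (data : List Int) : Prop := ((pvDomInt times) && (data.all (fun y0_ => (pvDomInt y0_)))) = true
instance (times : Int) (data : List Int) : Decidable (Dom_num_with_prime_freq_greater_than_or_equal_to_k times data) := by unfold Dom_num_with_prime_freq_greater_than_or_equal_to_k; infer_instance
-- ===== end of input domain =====

-- B replaces A's O(n^2) per-element data.count scans with one counting dict and a sieve-built
-- primality table indexed by frequency; both A and B sort `data` in place (same mutation),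
-- the equivalence proved is about the return value.
-- (A's `int(math.sqrt(n))` is ported as Nat.sqrt: exact for the arguments A feeds it,
--  frequencies 1 ≤ n ≤ len(data) ≤ 2^31 < 2^52, where math.sqrt's rounding is exact.)

-- ===== PORT A =====
-- helper `prime` of A: trial division up to int(math.sqrt(n)); the early `return False`
-- on a divisor is the List.all over the same range.
def primeA (n : Int) : Bool :=
  if n == 1 then false
  else (PySem.List.pyRange 2 (Int.ofNat (Nat.sqrt n.toNat) + 1) 1).all
        (fun i => !(PySem.Int.mod n i == 0))

def num_with_prime_freq_greater_than_or_equal_to_k (times : Int) (data : List Int) : List Int :=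
  let d := PySem.List.sorted data (fun x => x) false   -- data.sort()
  let c := d.foldl (fun c i =>
      if primeA (d.count i : Int) then
        if times ≤ (d.count i : Int) then
          if i ∈ c then c else c ++ [i]
        else c
      else c) []
  if c.length ≠ 0 then c else [-1]

-- ===== PORT B =====
-- B's sieve: is_prime = [i >= 2 for i in range(maxf+1)], then for p in range(2, isqrt(maxf)+1):
-- mark every m in range(p*p, maxf+1, p) False.  All written indices are nonnegative and in range,
-- so `is_prime[m] = False` is List.set m.toNat and the read `is_prime[f]` is List.getD f.toNat.
def sieveB (maxf : Int) : List Bool :=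
  let init := (PySem.List.pyRange 0 (maxf + 1) 1).map (fun i => decide (2 ≤ i))
  (PySem.List.pyRange 2 (Int.ofNat (Nat.sqrt maxf.toNat) + 1) 1).foldl
    (fun l p => (PySem.List.pyRange (p * p) (maxf + 1) p).foldl
      (fun l m => l.set m.toNat false) l) init

def num_with_prime_freq_greater_than_or_equal_to_k_alt (times : Int) (data : List Int) : List Int :=
  let d := PySem.List.sorted data (fun x => x) false   -- data.sort()
  let freq := d.foldl (fun acc x => acc.insert x (acc.getD x 0 + 1))
      (PySem.Dict.empty : PySem.Dict Int Int)          -- freq[x] = freq.get(x, 0) + 1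
  let isP := sieveB (d.length : Int)                   -- maxf = len(data)
  let res := (freq.items.filter
      (fun pr => isP.getD pr.2.toNat false && decide (times ≤ pr.2))).map (·.1)
  if res.isEmpty then [-1] else res

-- ===== PRECONDITION & SPEC =====
def Spec_num_with_prime_freq_greater_than_or_equal_to_k (times : Int) (data : List Int) (out : List Int) : Prop := out = num_with_prime_freq_greater_than_or_equal_to_k_alt times data
instance (times : Int) (data : List Int) (out : List Int) : Decidable (Spec_num_with_prime_freq_greater_than_or_equal_to_k times data out) := by unfold Spec_num_with_prime_freq_greater_than_or_equal_to_k; infer_instance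

-- ===== CLAIM (what is proved, stated in full; the proofs are below) =====
def Claim_equal_num_with_prime_freq_greater_than_or_equal_to_k : Prop := ∀ (times : Int) (data : List Int), Dom_num_with_prime_freq_greater_than_or_equal_to_k times data → Spec_num_with_prime_freq_greater_than_or_equal_to_k times data (num_with_prime_freq_greater_than_or_equal_to_k times data)

-- ===== LEMMAS AND PROOFS =====

-- the per-element condition both programs decide (count taken in the sorted list d)
def condP (times : Int) (d : List Int) (i : Int) : Bool :=
  primeA (d.count i : Int) && decide (times ≤ (d.count i : Int))

-- first-occurrence dedup relative to an already-seen set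
def dedupAux (seen : List Int) : List Int → List Int
  | [] => []
  | i :: l => if i ∈ seen then dedupAux seen l else i :: dedupAux (i :: seen) l

-- what A's loop accumulates, with the membership test against `seen`
def goA (P : Int → Bool) (seen : List Int) : List Int → List Int
  | [] => []
  | i :: l => if P i ∧ i ∉ seen then i :: goA P (i :: seen) l else goA P seen l

theorem goA_congr (P : Int → Bool) : ∀ (l seen seen' : List Int),
    (∀ x, P x = true → (x ∈ seen ↔ x ∈ seen')) → goA P seen l = goA P seen' l := by
  intro l
  induction l with
  | nil => intro seen seen' h; rfl
  | cons i l ih =>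
    intro seen seen' h
    simp only [goA]
    by_cases hp : P i = true
    · by_cases hm : i ∈ seen
      · rw [if_neg (by simp [hm]), if_neg (by simp [(h i hp).mp hm]), ih seen seen' h]
      · rw [if_pos ⟨hp, hm⟩, if_pos ⟨hp, fun hc => hm ((h i hp).mpr hc)⟩,
          ih (i :: seen) (i :: seen') (fun x hx => by simp [h x hx])]
    · rw [if_neg (by simp [hp]), if_neg (by simp [hp]), ih seen seen' h]


theorem foldA_eq_goA (P : Int → Bool) : ∀ (l c : List Int),
    l.foldl (fun c i => if P i then (if i ∈ c then c else c ++ [i]) else c) c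
      = c ++ goA P c l := by
  intro l
  induction l with
  | nil => intro c; simp [goA]
  | cons i l ih =>
    intro c
    simp only [List.foldl_cons, goA]
    by_cases hp : P i = true
    · by_cases hm : i ∈ c
      · rw [if_pos hp, if_pos hm, if_neg (by simp [hm]), ih c]
      · rw [if_pos hp, if_neg hm, if_pos ⟨hp, hm⟩, ih (c ++ [i]),
          goA_congr P l (c ++ [i]) (i :: c) (fun x _ => by simp [or_comm]),
          List.append_assoc]
        rfl
    · rw [if_neg hp, if_neg (by simp [hp]), ih c]


theorem goA_eq_filter_dedupAux (P : Int → Bool) : ∀ (l seen seen' : List Int),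
    (∀ x, P x = true → (x ∈ seen ↔ x ∈ seen')) →
    goA P seen l = (dedupAux seen' l).filter P := by
  intro l
  induction l with
  | nil => intro seen seen' h; rfl
  | cons i l ih =>
    intro seen seen' h
    simp only [goA, dedupAux]
    by_cases hm : i ∈ seen'
    · rw [if_pos hm]
      by_cases hp : P i = true
      · rw [if_neg (by simp [(h i hp).mpr hm]), ih seen seen' h]
      · rw [if_neg (by simp [hp]), ih seen seen' h]
    · rw [if_neg hm]
      by_cases hp : P i = true
      · rw [if_pos ⟨hp, fun hc => hm ((h i hp).mp hc)⟩, List.filter_cons_of_pos hp,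
          ih (i :: seen) (i :: seen') (fun x hx => by simp [h x hx])]
      · rw [if_neg (by simp [hp]), List.filter_cons_of_neg (by simp [hp]),
          ih seen (i :: seen') (fun x hx => by
            simp only [List.mem_cons, h x hx]
            constructor
            · exact Or.inr
            · rintro (rfl | hx2)
              · exact absurd hx hp
              · exact hx2)]


theorem dedupAux_congr : ∀ (l seen seen' : List Int),
    (∀ x, x ∈ seen ↔ x ∈ seen') → dedupAux seen l = dedupAux seen' l := by
  intro l
  induction l with
  | nil => intro seen seen' h; rfl
  | cons i l ih =>
    intro seen seen' h
    simp only [dedupAux]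
    by_cases hm : i ∈ seen
    · rw [if_pos hm, if_pos ((h i).mp hm), ih seen seen' h]
    · rw [if_neg hm, if_neg (fun hc => hm ((h i).mpr hc)),
        ih (i :: seen) (i :: seen') (fun x => by simp [h x])]

theorem foldl_add_eq_dedupAux : ∀ (l acc : List Int),
    l.foldl PySem.Set.add acc = acc ++ dedupAux acc l := by
  intro l
  induction l with
  | nil => intro acc; simp [dedupAux]
  | cons i l ih =>
    intro acc
    simp only [List.foldl_cons, dedupAux]
    by_cases hm : i ∈ acc
    · rw [PySem.Set.add_of_mem hm, if_pos hm, ih acc]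
    · rw [PySem.Set.add_of_not_mem hm, if_neg hm, ih (acc ++ [i]),
        dedupAux_congr l (acc ++ [i]) (i :: acc) (fun x => by simp [or_comm]),
        List.append_assoc]
      rfl

theorem ofList_eq_dedupAux (l : List Int) : PySem.Set.ofList l = dedupAux [] l := by
  rw [PySem.Set.ofList_eq_foldl, foldl_add_eq_dedupAux l []]
  rfl

-- getD after List.set _ false
theorem getD_set_false (l : List Bool) (k j : Nat) :
    (l.set k false).getD j false = ((l.getD j false) && !(k == j)) := by
  by_cases hkj : k = j
  · subst hkj
    by_cases hk : k < l.length
    · simp [List.getD_eq_getElem?_getD, hk]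
    · simp [List.getD_eq_getElem?_getD, List.getElem?_eq_none (by simpa using Nat.le_of_not_lt hk),
        List.set_eq_of_length_le (by simpa using Nat.le_of_not_lt hk)]
  · simp [List.getD_eq_getElem?_getD, List.getElem?_set_ne (by omega : k ≠ j), hkj]

-- one inner marking pass
theorem getD_foldl_set_false (ms : List Int) : ∀ (l : List Bool) (j : Nat),
    (ms.foldl (fun l m => l.set m.toNat false) l).getD j false
      = ((l.getD j false) && ms.all (fun m => !(m.toNat == j))) := by
  induction ms with
  | nil => intro l j; simp
  | cons m ms ih =>
    intro l j
    simp only [List.foldl_cons, List.all_cons, ih, getD_set_false, Bool.and_assoc]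

-- the outer sieve fold, pointwise
theorem getD_outer_fold (g : Int → List Int) : ∀ (ps : List Int) (l : List Bool) (j : Nat),
    (ps.foldl (fun l p => (g p).foldl (fun l m => l.set m.toNat false) l) l).getD j false
      = ((l.getD j false) && ps.all (fun p => (g p).all (fun m => !(m.toNat == j)))) := by
  intro ps
  induction ps with
  | nil => intro l j; simp
  | cons p ps ih =>
    intro l j
    simp only [List.foldl_cons, List.all_cons, ih, getD_foldl_set_false, Bool.and_assoc]

-- the initial table [i >= 2 for i in range(N+1)], pointwise
theorem getD_init (N : Int) (j : Nat) (h0 : 0 ≤ N) (hj : (j : Int) ≤ N) :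
    ((PySem.List.pyRange 0 (N + 1) 1).map (fun i => decide (2 ≤ i))).getD j false
      = decide (2 ≤ j) := by
  rw [PySem.List.pyRange_one]
  simp only [List.map_map]
  rw [PySem.List.getD_map_range _ _ j _ (by omega)]
  simp only [Function.comp_apply]
  simp

-- the whole sieve, characterised pointwise
theorem getD_sieveB (N : Int) (j : Nat) (h0 : 0 ≤ N) (hj : (j : Int) ≤ N) :
    (sieveB N).getD j false
      = (decide (2 ≤ j) &&
         (PySem.List.pyRange 2 (Int.ofNat (Nat.sqrt N.toNat) + 1) 1).all
           (fun p => (PySem.List.pyRange (p * p) (N + 1) p).all (fun m => !(m.toNat == j)))) := by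
  unfold sieveB
  rw [getD_outer_fold, getD_init N j h0 hj]

-- number theory: the sieve table says Nat.Prime
theorem sieveB_prime (N : Int) (j : Nat) (h0 : 0 ≤ N) (hj : (j : Int) ≤ N) :
    (sieveB N).getD j false = decide (Nat.Prime j) := by
  rw [getD_sieveB N j h0 hj, Bool.eq_iff_iff]
  simp only [Bool.and_eq_true, decide_eq_true_eq, List.all_eq_true,
    PySem.List.mem_pyRange_one, Bool.not_eq_eq_eq_not, Bool.not_true, beq_eq_false_iff_ne,
    Int.ofNat_eq_natCast]
  constructor
  · rintro ⟨h2, hall⟩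
    rw [Nat.prime_def_le_sqrt]
    refine ⟨h2, fun m hm2 hmsq hdvd => ?_⟩
    have hjN : j ≤ N.toNat := by omega
    have hmN : m ≤ Nat.sqrt N.toNat := le_trans hmsq (Nat.sqrt_le_sqrt hjN)
    have hmmj : m * m ≤ j := Nat.le_sqrt.mp hmsq
    have hm' : (j : Int) ∈ PySem.List.pyRange ((m:Int) * (m:Int)) (N + 1) (m:Int) := by
      rw [PySem.List.mem_pyRange_iff_of_pos (by exact_mod_cast Nat.lt_of_lt_of_le (by norm_num) hm2)]
      refine ⟨by exact_mod_cast hmmj, by omega, ?_⟩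
      have hd1 : (m : Int) ∣ (j : Int) := Int.natCast_dvd_natCast.mpr hdvd
      exact dvd_sub hd1 (Dvd.intro _ rfl)
    have hlt : (m : Int) < (Nat.sqrt N.toNat : Int) + 1 := by
      have : (m : Int) ≤ (Nat.sqrt N.toNat : Int) := by exact_mod_cast hmN
      omega
    exact hall (m : Int) ⟨by exact_mod_cast hm2, hlt⟩ (j : Int) hm' (by simp)
  · intro hp
    have h2 : 2 ≤ j := (Nat.prime_def_le_sqrt.mp hp).1
    refine ⟨h2, ?_⟩
    rintro p ⟨hp2, hplt⟩ m hm hmj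
    rw [PySem.List.mem_pyRange_iff_of_pos (by omega)] at hm
    obtain ⟨hpp, hmN, hdvd⟩ := hm
    have hm0 : (0:Int) ≤ m := le_trans (by nlinarith) hpp
    have hmz : m = (j : Int) := by omega
    subst hmz
    have hpdvd : p ∣ (j : Int) := by
      have := dvd_add hdvd (dvd_mul_left p p)
      simpa using this
    have hpq : p = ((p.toNat : Nat) : Int) := by omega
    rw [hpq] at hpdvd hpp hp2
    have hq2 : 2 ≤ p.toNat := by exact_mod_cast hp2
    have hqdvd : p.toNat ∣ j := Int.natCast_dvd_natCast.mp hpdvd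
    have hqq : p.toNat * p.toNat ≤ j := by exact_mod_cast hpp
    rcases (Nat.Prime.eq_one_or_self_of_dvd hp p.toNat hqdvd) with h1 | hs
    · omega
    · rw [hs] at hqq; nlinarith

-- number theory: A's trial division says Nat.Prime
theorem primeA_eq_prime (n : Int) (h : 1 ≤ n) : primeA n = decide (Nat.Prime n.toNat) := by
  unfold primeA
  by_cases h1 : n = 1
  · subst h1; simp [Nat.prime_def_le_sqrt]
  · rw [if_neg (by simpa using h1), Bool.eq_iff_iff]
    have h2 : 2 ≤ n := by omega
    simp only [List.all_eq_true, PySem.List.mem_pyRange_one, decide_eq_true_eq,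
      Bool.not_eq_eq_eq_not, Bool.not_true, beq_eq_false_iff_ne, Int.ofNat_eq_natCast]
    constructor
    · intro hall
      rw [Nat.prime_def_le_sqrt]
      refine ⟨by omega, fun m hm2 hmsq hdvd => ?_⟩
      have hlt : (m : Int) < (Nat.sqrt n.toNat : Int) + 1 := by
        have : (m : Int) ≤ (Nat.sqrt n.toNat : Int) := by exact_mod_cast hmsq
        omega
      apply hall (m : Int) ⟨by exact_mod_cast hm2, hlt⟩
      rw [PySem.Int.mod_eq_zero_iff_dvd]
      have hn : n = ((n.toNat : Nat) : Int) := by omega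
      rw [hn]
      exact_mod_cast hdvd
    · rintro hp i ⟨hi2, hilt⟩ hmod
      rw [PySem.Int.mod_eq_zero_iff_dvd] at hmod
      have hq2 : 2 ≤ i.toNat := by omega
      have hdvd : i.toNat ∣ n.toNat := by
        have hi : i = ((i.toNat : Nat) : Int) := by omega
        have hn : n = ((n.toNat : Nat) : Int) := by omega
        rw [hi, hn] at hmod
        exact_mod_cast hmod
      have hsq : i.toNat ≤ Nat.sqrt n.toNat := by
        have : (i.toNat : Int) < (Nat.sqrt n.toNat : Int) + 1 := by omega
        omega
      exact (Nat.prime_def_le_sqrt.mp hp).2 i.toNat hq2 hsq hdvd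

-- the two per-element conditions agree on elements of d
theorem condB_eq_condP (times : Int) (d : List Int) (i : Int) (hi : i ∈ d) :
    ((sieveB (d.length : Int)).getD ((d.count i : Int)).toNat false
       && decide (times ≤ (d.count i : Int))) = condP times d i := by
  unfold condP
  congr 1
  have hc1 : 1 ≤ d.count i := List.count_pos_iff.mpr hi
  have hcl : d.count i ≤ d.length := List.count_le_length
  have ht : ((d.count i : Int)).toNat = d.count i := by omega
  rw [ht, sieveB_prime (d.length : Int) (d.count i) (by positivity) (by exact_mod_cast hcl),
    primeA_eq_prime (d.count i : Int) (by exact_mod_cast hc1)]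
  congr 1

-- the loop bodies of A and B compute the same list, before the [-1] wrapping
theorem main_eq (times : Int) (d : List Int) :
    (d.foldl (fun c i =>
        if primeA (d.count i : Int) then
          if times ≤ (d.count i : Int) then
            if i ∈ c then c else c ++ [i]
          else c
        else c) [])
      = ((d.foldl (fun acc x => acc.insert x (acc.getD x 0 + 1))
            (PySem.Dict.empty : PySem.Dict Int Int)).items.filter
          (fun pr => (sieveB (d.length : Int)).getD pr.2.toNat false
              && decide (times ≤ pr.2))).map (·.1) := by
  have hstep : (d.foldl (fun c i =>
        if primeA (d.count i : Int) then
          if times ≤ (d.count i : Int) then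
            if i ∈ c then c else c ++ [i]
          else c
        else c) ([] : List Int))
      = d.foldl (fun c i => if condP times d i then (if i ∈ c then c else c ++ [i]) else c) [] := by
    congr 1
    funext c i
    unfold condP
    by_cases h1 : primeA ((d.count i : Int)) <;> by_cases h2 : times ≤ ((d.count i : Int)) <;>
      simp [h1, h2]
  rw [hstep, foldA_eq_goA, List.nil_append,
    goA_eq_filter_dedupAux _ d [] [] (fun _ _ => Iff.rfl), ← ofList_eq_dedupAux,
    PySem.Dict.foldl_insert_getD_add_one_eq_counter, PySem.Dict.items_counter,
    List.filter_map, List.map_map]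
  have hmap : ((fun pr : Int × Int => pr.1) ∘ (fun k => (k, (d.count k : Int)))) = id := rfl
  rw [hmap, List.map_id]
  apply List.filter_congr
  intro x hx
  have hxd : x ∈ d := (PySem.Set.mem_ofList d x).mp hx
  simpa using (condB_eq_condP times d x hxd).symm

-- ===== VERDICT (by name: the statement is the Claim_ definition above) =====
theorem num_with_prime_freq_greater_than_or_equal_to_k_spec : Claim_equal_num_with_prime_freq_greater_than_or_equal_to_k := by
  intro times data _
  unfold Spec_num_with_prime_freq_greater_than_or_equal_to_k
  simp only [num_with_prime_freq_greater_than_or_equal_to_k,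
    num_with_prime_freq_greater_than_or_equal_to_k_alt]
  rw [main_eq times (PySem.List.sorted data (fun x => x) false)]
  set r := ((PySem.List.sorted data (fun x => x) false).foldl
      (fun acc x => acc.insert x (acc.getD x 0 + 1))
      (PySem.Dict.empty : PySem.Dict Int Int)).items.filter
    (fun pr => (sieveB ((PySem.List.sorted data (fun x => x) false).length : Int)).getD
        pr.2.toNat false && decide (times ≤ pr.2)) |>.map (·.1) with hr
  by_cases h : r = []
  · simp [h]
  · simp [h, List.length_eq_zero_iff]
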